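-- pv_equiv track=rewrite | github.com/ZhenningLang/iterm2-paste-image | paw.py | column_to_char_index
-- ===== SOURCE A (Python) =====
-- import unicodedata
--
-- def is_wide_char(ch):
--     return unicodedata.east_asian_width(ch) in ("F", "W")
--
-- def column_to_char_index(text, column):
--     col = 0
--     for i, ch in enumerate(text):
--         w = 2 if is_wide_char(ch) else 1
--         if col + w > column:
--             return i
--         col += w
--     return len(text)
-- ===== SOURCE B (Python) =====
-- import unicodedata
--
--
-- def is_wide_char(ch):
--     return unicodedata.east_asian_width(ch) in ("F", "W")
--
--
-- def column_to_char_index(text, column):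
--     # Prefix table of cumulative display columns, then binary search for the
--     # first index whose cumulative width exceeds column.
--     cumsum = []
--     total = 0
--     for ch in text:
--         total += 2 if is_wide_char(ch) else 1
--         cumsum.append(total)
--     lo, hi = 0, len(cumsum)
--     while lo < hi:
--         mid = (lo + hi) // 2
--         if cumsum[mid] <= column:
--             lo = mid + 1
--         else:
--             hi = mid
--     return lo
-- ===== Notes on version B (the rewrite author's own statement) =====
-- stated objective: alternative
-- what changed: B builds a prefix table of cumulative display columns once and then locates the answer by binary search over that strictly increasing table, instead of A's single accumulate-and-test linear scan with an early return.
import Mathlib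
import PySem

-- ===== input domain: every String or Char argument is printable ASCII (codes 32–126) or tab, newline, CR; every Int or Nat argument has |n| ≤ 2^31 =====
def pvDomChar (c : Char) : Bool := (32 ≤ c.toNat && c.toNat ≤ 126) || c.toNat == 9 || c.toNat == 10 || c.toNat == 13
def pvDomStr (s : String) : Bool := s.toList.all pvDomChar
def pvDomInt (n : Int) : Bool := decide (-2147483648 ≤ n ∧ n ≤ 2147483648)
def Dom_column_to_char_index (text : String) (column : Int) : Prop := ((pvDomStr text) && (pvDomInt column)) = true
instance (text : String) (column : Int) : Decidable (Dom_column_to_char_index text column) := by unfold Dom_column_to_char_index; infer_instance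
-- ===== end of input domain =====

-- B replaces A's linear accumulate-and-test scan by a cumulative-column prefix table
-- plus a binary search over it (alternative decomposition; same exact result).


-- ===== PORT A =====
-- is_wide_char: exact on the stated domain (printable ASCII + tab/newline/CR), where
-- east_asian_width is never "F"/"W"; all east-asian Fullwidth/Wide chars are ≥ U+1100.
def isWideChar (ch : Char) : Bool := decide (0x1100 ≤ ch.toNat)

-- `2 if is_wide_char(ch) else 1`
def width (ch : Char) : Int := if isWideChar ch then 2 else 1

-- the for-loop of A: carries the enumerate index i and the running column col
def goA (column : Int) (n : Nat) : Nat → Int → List Char → Int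
  | _, _, [] => (n : Int)                                   -- `return len(text)`
  | i, col, ch :: rest =>
      let w := width ch
      if col + w > column then (i : Int) else goA column n (i + 1) (col + w) rest

def column_to_char_index (text : String) (column : Int) : Int :=
  goA column text.toList.length 0 0 text.toList

-- ===== PORT B =====
-- the prefix-table loop of B: cumsum.append(total) with total += w
def scanSums (column : Int) : Int → List Char → List Int
  | _, [] => []
  | total, ch :: rest =>
      let w := width ch
      (total + w) :: scanSums column (total + w) rest

-- the while-loop of B: textbook binary search (bisect_right)
def bsearch (cs : List Int) (column : Int) (lo hi : Nat) : Nat :=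
  if h : lo < hi then
    let mid := (lo + hi) / 2
    if cs.getD mid 0 ≤ column then bsearch cs column (mid + 1) hi
    else bsearch cs column lo mid
  else lo
termination_by hi - lo
decreasing_by all_goals omega

def column_to_char_index_alt (text : String) (column : Int) : Int :=
  ((bsearch (scanSums column 0 text.toList) column 0 (scanSums column 0 text.toList).length : Nat) : Int)

-- ===== PRECONDITION & SPEC =====
def Spec_column_to_char_index (text : String) (column : Int) (out : Int) : Prop := out = column_to_char_index_alt text column
instance (text : String) (column : Int) (out : Int) : Decidable (Spec_column_to_char_index text column out) := by unfold Spec_column_to_char_index; infer_instance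

-- ===== CLAIM (what is proved, stated in full; the proofs are below) =====
def Claim_equal_column_to_char_index : Prop := ∀ (text : String) (column : Int), Dom_column_to_char_index text column → Spec_column_to_char_index text column (column_to_char_index text column)

-- ===== LEMMAS AND PROOFS =====

-- the count of leading characters whose cumulative column stays ≤ column
def cnt (column : Int) : Int → List Char → Nat
  | _, [] => 0
  | col, ch :: rest =>
      if col + width ch > column then 0 else 1 + cnt column (col + width ch) rest

lemma cnt_le_length (column col : Int) (l : List Char) : cnt column col l ≤ l.length := by
  induction l generalizing col with
  | nil => simp [cnt]
  | cons ch rest ih =>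
      simp only [cnt, List.length_cons]
      split
      · omega
      · have := ih (col + width ch); omega

lemma goA_eq_cnt (column : Int) (n : Nat) (l : List Char) :
    ∀ i col, goA column n i col l =
      (if cnt column col l = l.length then (n : Int) else ((i + cnt column col l : Nat) : Int)) := by
  induction l with
  | nil => intro i col; simp [goA, cnt]
  | cons ch rest ih =>
      intro i col
      simp only [goA, cnt]
      by_cases h : col + width ch > column
      · have hlen := cnt_le_length column col (ch :: rest)
        simp only [if_pos h]
        simp
      · simp only [if_neg h, ih (i+1)]
        by_cases h2 : cnt column (col + width ch) rest = rest.length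
        · simp only [h2, List.length_cons]
          rw [if_pos trivial, if_pos (show 1 + rest.length = rest.length + 1 by omega)]
        · have h3 : ¬ (1 + cnt column (col + width ch) rest = (ch :: rest).length) := by
            simp only [List.length_cons]; omega
          simp only [if_neg h2, if_neg h3]
          congr 1
          omega

lemma length_scanSums (column col : Int) (l : List Char) :
    (scanSums column col l).length = l.length := by
  induction l generalizing col with
  | nil => simp [scanSums]
  | cons ch rest ih => simp [scanSums, ih]

lemma width_pos (ch : Char) : 0 < width ch := by
  unfold width; split <;> omega

lemma lt_of_mem_scanSums (column col : Int) (l : List Char) :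
    ∀ x ∈ scanSums column col l, col < x := by
  induction l generalizing col with
  | nil => simp [scanSums]
  | cons ch rest ih =>
      intro x hx
      simp only [scanSums, List.mem_cons] at hx
      have hw := width_pos ch
      rcases hx with h | h
      · omega
      · have := ih (col + width ch) x h
        omega

lemma scanSums_pairwise (column col : Int) (l : List Char) :
    (scanSums column col l).Pairwise (· < ·) := by
  induction l generalizing col with
  | nil => simp [scanSums]
  | cons ch rest ih =>
      simp only [scanSums, List.pairwise_cons]
      exact ⟨fun x hx => lt_of_mem_scanSums column _ rest x hx, ih _⟩

lemma scanSums_mono (column col : Int) (l : List Char) (i j : Nat) (hij : i ≤ j)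
    (hj : j < (scanSums column col l).length) :
    (scanSums column col l)[i]'(by omega) ≤ (scanSums column col l)[j] := by
  rcases Nat.lt_or_ge i j with h | h
  · have := (List.pairwise_iff_getElem.mp (scanSums_pairwise column col l)) i j (by omega) hj h
    exact le_of_lt this
  · have heq : i = j := by omega
    subst heq; exact le_rfl

-- cnt is exactly "the first index of the prefix table whose value exceeds column"
lemma cnt_spec (column : Int) (col : Int) (l : List Char) :
    (∀ k (hk : k < (scanSums column col l).length), k < cnt column col l →
        (scanSums column col l)[k] ≤ column) ∧
    (∀ hk : cnt column col l < (scanSums column col l).length,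
        column < (scanSums column col l)[cnt column col l]) := by
  induction l generalizing col with
  | nil => constructor <;> simp [scanSums, cnt]
  | cons ch rest ih =>
      by_cases h : col + width ch > column
      · constructor
        · intro k hk hklt
          simp only [cnt, if_pos h] at hklt
          omega
        · intro hk
          simp only [cnt, if_pos h]
          simpa [scanSums] using h
      · obtain ⟨ih1, ih2⟩ := ih (col + width ch)
        constructor
        · intro k hk hklt
          simp only [cnt, if_neg h] at hklt
          match k with
          | 0 => simpa [scanSums] using le_of_not_gt h
          | k + 1 =>
              simp only [scanSums, List.getElem_cons_succ]
              exact ih1 k (by simpa [scanSums] using hk) (by omega)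
        · intro hk
          simp only [cnt, if_neg h] at hk ⊢
          have hk' : cnt column (col + width ch) rest < (scanSums column (col + width ch) rest).length := by
            simp only [scanSums, List.length_cons] at hk; omega
          have := ih2 hk'
          simpa [scanSums, Nat.add_comm 1 (cnt column (col + width ch) rest)] using this

lemma bsearch_eq (cs : List Int) (column : Int) (N : Nat)
    (hmono : ∀ i j (hij : i ≤ j) (hj : j < cs.length), cs[i]'(by omega) ≤ cs[j])
    (hlow : ∀ k (hk : k < cs.length), k < N → cs[k] ≤ column)
    (hhigh : ∀ hk : N < cs.length, column < cs[N]) :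
    ∀ lo hi, lo ≤ N → N ≤ hi → hi ≤ cs.length → bsearch cs column lo hi = N := by
  intro lo hi
  induction hn : hi - lo using Nat.strong_induction_on generalizing lo hi with
  | _ d ih =>
    intro hlo hhi hlen
    rw [bsearch]
    by_cases h : lo < hi
    · simp only [dif_pos h]
      have hmid : (lo + hi) / 2 < cs.length := by omega
      rw [List.getD_eq_getElem cs 0 hmid]
      by_cases hc : cs[(lo + hi) / 2] ≤ column
      · have hNgt : (lo + hi) / 2 < N := by
          by_contra hcon
          have hNle : N ≤ (lo + hi) / 2 := by omega
          have hNlt : N < cs.length := by omega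
          have h1 := hmono N ((lo + hi) / 2) hNle hmid
          have h2 := hhigh hNlt
          omega
        simp only [if_pos hc]
        refine ih (hi - ((lo + hi) / 2 + 1)) (by omega) ((lo + hi) / 2 + 1) hi ?_ ?_ ?_ ?_ <;> omega
      · have hNle : N ≤ (lo + hi) / 2 := by
          by_contra hcon
          exact hc (hlow _ hmid (by omega))
        simp only [if_neg hc]
        refine ih ((lo + hi) / 2 - lo) (by omega) lo ((lo + hi) / 2) ?_ ?_ ?_ ?_ <;> omega
    · simp only [dif_neg h]
      omega

-- ===== VERDICT (by name: the statement is the Claim_ definition above) =====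
theorem column_to_char_index_spec : Claim_equal_column_to_char_index := by
  intro text column _
  unfold Spec_column_to_char_index column_to_char_index column_to_char_index_alt
  obtain ⟨hlow, hhigh⟩ := cnt_spec column 0 text.toList
  have hlen : (scanSums column 0 text.toList).length = text.toList.length :=
    length_scanSums column 0 text.toList
  have hNle : cnt column 0 text.toList ≤ (scanSums column 0 text.toList).length := by
    rw [hlen]; exact cnt_le_length column 0 text.toList
  have hb : bsearch (scanSums column 0 text.toList) column 0 (scanSums column 0 text.toList).length
      = cnt column 0 text.toList :=
    bsearch_eq _ column _ (fun i j hij hj => scanSums_mono column 0 text.toList i j hij hj)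
      hlow hhigh 0 _ (by omega) hNle le_rfl
  rw [goA_eq_cnt, hb]
  split <;> omega
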